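-- pv_equiv track=rewrite | github.com/sociallyencrypted/CSE101 | Lab 8/6.py | twoSmallest
-- ===== SOURCE A (Python) =====
-- def twoSmallest(l, m, n, count):
--     if count == len(l):
--         return [m, n]
--     if count == 0:
--         if l[0] < l[1]:
--             m = l[0]
--             n = l[1]
--         else:
--             n = l[0]
--             m = l[1]
--     else:
--         if l[count] < m:
--             n = m
--             m = l[count]
--         elif l[count] < n:
--             n = l[count]
--
--     return twoSmallest(l, m, n, count + 1)
-- ===== SOURCE B (Python) =====
-- def twoSmallest(l, m, n, count):
--     while count != len(l):
--         x = l[count]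
--         if count == 0:
--             y = l[1]
--             m, n = (x, y) if x < y else (y, x)
--         elif x < m:
--             m, n = x, m
--         elif x < n:
--             n = x
--         count += 1
--     return [m, n]
-- ===== Notes on version B (the rewrite author's own statement) =====
-- stated objective: idiomatic
-- what changed: The tail recursion is rewritten as an iterative while loop over count with the element read once per iteration and the update expressed as tuple assignments, returning [m, n] after the loop.
import Mathlib
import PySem

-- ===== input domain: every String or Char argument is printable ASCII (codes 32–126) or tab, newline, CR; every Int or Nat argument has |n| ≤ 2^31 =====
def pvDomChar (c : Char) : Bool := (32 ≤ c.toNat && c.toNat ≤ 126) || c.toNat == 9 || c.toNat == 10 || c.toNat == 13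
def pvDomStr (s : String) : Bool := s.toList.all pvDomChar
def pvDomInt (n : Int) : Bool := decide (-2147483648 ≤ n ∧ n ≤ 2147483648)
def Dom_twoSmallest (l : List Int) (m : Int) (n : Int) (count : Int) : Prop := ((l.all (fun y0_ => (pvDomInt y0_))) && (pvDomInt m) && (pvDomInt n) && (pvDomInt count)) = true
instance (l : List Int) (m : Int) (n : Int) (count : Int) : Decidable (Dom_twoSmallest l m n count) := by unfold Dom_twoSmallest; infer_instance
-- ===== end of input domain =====

-- B rewrites A's tail recursion as an iterative while loop (idiomatic); same values, same raising inputs.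

-- ===== PORT A =====
-- literal port of A's recursion; on inputs where Python raises IndexError the port returns [] (excluded by Pre_)
def twoSmallest (l : List Int) (m : Int) (n : Int) (count : Int) : List Int :=
  if count = (l.length : Int) then [m, n]
  else if count = 0 then
    match h0 : PySem.List.pyGet? l 0, h1 : PySem.List.pyGet? l 1 with
    | some a, some b =>
      if a < b then twoSmallest l a b (count + 1)
      else twoSmallest l b a (count + 1)
    | _, _ => []  -- IndexError
  else
    match hx : PySem.List.pyGet? l count with
    | some x =>
      if x < m then twoSmallest l x m (count + 1)
      else if x < n then twoSmallest l m x (count + 1)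
      else twoSmallest l m n (count + 1)
    | none => []  -- IndexError
termination_by ((l.length : Int) - count).toNat
decreasing_by
  all_goals
    first
      | (have := PySem.List.pyGet?_eq_none_iff (xs := l) (i := 1)
         simp [PySem.Raise.InRange, h1] at this
         omega)
      | (have := PySem.List.pyGet?_eq_none_iff (xs := l) (i := count)
         simp [PySem.Raise.InRange, hx] at this
         omega)

-- ===== PORT B =====
-- port of Source B's while loop: one guarded body computing the next (m, n), then count += 1
def twoSmallest_alt (l : List Int) (m : Int) (n : Int) (count : Int) : List Int :=
  if count = (l.length : Int) then [m, n]
  else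
    match hx : PySem.List.pyGet? l count with
    | none => []  -- IndexError
    | some x =>
      if count = 0 then
        match h1 : PySem.List.pyGet? l 1 with
        | none => []  -- IndexError
        | some y =>
          let p := if x < y then (x, y) else (y, x)
          twoSmallest_alt l p.1 p.2 (count + 1)
      else
        let p := if x < m then (x, m) else if x < n then (m, x) else (m, n)
        twoSmallest_alt l p.1 p.2 (count + 1)
termination_by ((l.length : Int) - count).toNat
decreasing_by
  all_goals
    have := PySem.List.pyGet?_eq_none_iff (xs := l) (i := count)
    simp [PySem.Raise.InRange, hx] at this
    omega

-- ===== PRECONDITION & SPEC =====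
-- Pre_ excludes exactly the inputs on which the Python A raises IndexError (count beyond the
-- list, a negative count below -len, or count = 0 with fewer than two elements).
def Pre_twoSmallest (l : List Int) (m : Int) (n : Int) (count : Int) : Prop :=
  count = (l.length : Int) ∨
    (count < (l.length : Int) ∧ (0 < count ∨ (-(l.length : Int) ≤ count ∧ 2 ≤ l.length)))
instance (l : List Int) (m : Int) (n : Int) (count : Int) : Decidable (Pre_twoSmallest l m n count) := by unfold Pre_twoSmallest; infer_instance

def pvWitness_twoSmallest : List Int × Int × Int × Int := ([4, 2, 7, 1], 0, 0, 0)

def Spec_twoSmallest (l : List Int) (m : Int) (n : Int) (count : Int) (out : List Int) : Prop := out = twoSmallest_alt l m n count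
instance (l : List Int) (m : Int) (n : Int) (count : Int) (out : List Int) : Decidable (Spec_twoSmallest l m n count out) := by unfold Spec_twoSmallest; infer_instance

-- ===== CLAIM (what is proved, stated in full; the proofs are below) =====
def Claim_equal_twoSmallest : Prop := ∀ (l : List Int) (m : Int) (n : Int) (count : Int), Dom_twoSmallest l m n count → Pre_twoSmallest l m n count → Spec_twoSmallest l m n count (twoSmallest l m n count)

-- ===== LEMMAS AND PROOFS =====

-- the two ports agree on every input (even outside Pre_, where both return the junk value [])
theorem twoSmallest_eq_alt (l : List Int) (m n count : Int) :
    twoSmallest l m n count = twoSmallest_alt l m n count := by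
  fun_induction twoSmallest l m n count <;> (rw [twoSmallest_alt]; simp_all) <;> (repeat' (split <;> simp_all)) <;> omega

-- ===== VERDICT (by name: the statement is the Claim_ definition above) =====
theorem twoSmallest_spec : Claim_equal_twoSmallest := by
  intro l m n count _ _
  unfold Spec_twoSmallest
  exact twoSmallest_eq_alt l m n count
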